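-- pv_equiv track=rewrite | github.com/Outsou/mas-project | utils/stats.py | append_top_dictionaries
-- ===== SOURCE A (Python) =====
-- def append_top_dictionaries(dict1, dict2):
--     """Appends top pick stat dictionaries."""
--     if len(list(dict1.keys())) == 0:
--         return dict2
--
--     res_dict = {}
--     for key in dict1.keys():
--         res_dict[key] = {}
--         for sub_key in dict1[key].keys():
--             res_dict[key][sub_key] = []
--             for i in range(len(dict1[key][sub_key])):
--                 res_dict[key][sub_key].append(dict1[key][sub_key][i] + dict2[key][sub_key][i])
--     return res_dict
-- ===== SOURCE B (Python) =====
-- def append_top_dictionaries(dict1, dict2):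
--     """Appends top pick stat dictionaries."""
--     if not dict1:
--         return dict2
--
--     def add(a, b):
--         if isinstance(a, dict):
--             return {k: add(a[k], b.get(k, {})) for k in a}
--         return [a[i] + b[i] for i in range(len(a))]
--
--     return add(dict1, dict2)
-- ===== Notes on version B (the rewrite author's own statement) =====
-- stated objective: simpler
-- what changed: Replaces the three explicit nested loops that build a fresh result dict by repeated insertion with a single recursive helper that maps a dict comprehension over each nesting level and a list comprehension over the leaves.
import Mathlib
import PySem

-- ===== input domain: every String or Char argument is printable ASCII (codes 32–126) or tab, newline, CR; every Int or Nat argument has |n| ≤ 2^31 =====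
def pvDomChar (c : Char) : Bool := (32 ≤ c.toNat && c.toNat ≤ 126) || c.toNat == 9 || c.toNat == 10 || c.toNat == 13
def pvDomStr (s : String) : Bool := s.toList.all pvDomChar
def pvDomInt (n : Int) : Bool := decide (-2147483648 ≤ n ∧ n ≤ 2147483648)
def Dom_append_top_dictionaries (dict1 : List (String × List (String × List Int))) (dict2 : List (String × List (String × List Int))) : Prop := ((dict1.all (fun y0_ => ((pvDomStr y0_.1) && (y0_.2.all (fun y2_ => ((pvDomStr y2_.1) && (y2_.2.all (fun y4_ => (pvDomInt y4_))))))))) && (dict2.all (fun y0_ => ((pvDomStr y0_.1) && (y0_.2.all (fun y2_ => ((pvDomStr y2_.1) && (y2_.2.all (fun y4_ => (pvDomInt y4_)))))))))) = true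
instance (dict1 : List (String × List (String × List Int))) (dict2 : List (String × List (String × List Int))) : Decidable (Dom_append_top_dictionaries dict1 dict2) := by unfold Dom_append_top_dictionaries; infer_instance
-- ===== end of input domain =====

-- B replaces A's three nested insertion loops by a single structural map/zip recursion (same cost); equivalence proved on Pre_.


-- ===== PORT A =====
-- literal transliteration: res_dict is a dict of dicts built by insertion over dict1's keys; each
-- leaf list is built by the index loop 'for i in range(len(dict1[k][sk]))' appending
-- dict1[k][sk][i] + dict2[k][sk][i]; returned converted to the nested association-list convention
def append_top_dictionaries (dict1 : List (String × List (String × List Int))) (dict2 : List (String × List (String × List Int))) : List (String × List (String × List Int)) :=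
  let dd1 : PySem.Dict String (List (String × List Int)) := PySem.Dict.mk dict1
  if dd1.keys.length = 0 then dict2
  else
    let res : PySem.Dict String (PySem.Dict String (List Int)) :=
      dd1.keys.foldl (fun res key =>
        let sub1 : PySem.Dict String (List Int) := PySem.Dict.mk (dd1.getD key [])
        let inner : PySem.Dict String (List Int) :=
          sub1.keys.foldl (fun inr skey =>
            let l1 := sub1.getD skey []
            let l2 := (PySem.Dict.mk ((PySem.Dict.mk dict2).getD key [])).getD skey []
            let lst := (PySem.List.pyRange 0 (l1.length : Int) 1).foldl
              (fun acc i => acc ++ [PySem.List.pyGetD l1 i 0 + PySem.List.pyGetD l2 i 0]) []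
            inr.insert skey lst) PySem.Dict.empty
        res.insert key inner) PySem.Dict.empty
    res.items.map (fun p => (p.1, p.2.items))

-- ===== PORT B =====
-- '[a[i] + b[i] for i in range(len(a))]'
def pvAddLists (a b : List Int) : List Int :=
  (PySem.List.pyRange 0 (a.length : Int) 1).map
    (fun i => PySem.List.pyGetD a i 0 + PySem.List.pyGetD b i 0)

-- literal transliteration of Source B: one comprehension per nesting level of the recursion,
-- 'b.get(k, {})' lookups ported as getD with the empty default
def append_top_dictionaries_alt (dict1 : List (String × List (String × List Int))) (dict2 : List (String × List (String × List Int))) : List (String × List (String × List Int)) :=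
  if dict1.isEmpty then dict2
  else
    dict1.map (fun p =>
      (p.1, p.2.map (fun q =>
        (q.1, pvAddLists q.2 ((PySem.Dict.mk ((PySem.Dict.mk dict2).getD p.1 [])).getD q.1 [])))))

-- ===== PRECONDITION & SPEC =====
-- Pre_ excludes (a) inputs on which Python A raises (a key of dict1 with a NONEMPTY leaf list that is
-- missing from dict2, or whose dict2 list is shorter: KeyError/IndexError — Python B raises on
-- exactly the same inputs), and (b) association lists with duplicate keys inside dict1, which have
-- no Python-dict counterpart.
def Pre_append_top_dictionaries (dict1 : List (String × List (String × List Int))) (dict2 : List (String × List (String × List Int))) : Prop :=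
  (dict1.map Prod.fst).Nodup ∧
  ∀ p ∈ dict1, (p.2.map Prod.fst).Nodup ∧
    ∀ q ∈ p.2, q.2.length ≤ ((PySem.Dict.mk ((PySem.Dict.mk dict2).getD p.1 [])).getD q.1 []).length
instance (dict1 : List (String × List (String × List Int))) (dict2 : List (String × List (String × List Int))) : Decidable (Pre_append_top_dictionaries dict1 dict2) := by unfold Pre_append_top_dictionaries; infer_instance

def pvWitness_append_top_dictionaries : (List (String × List (String × List Int))) × (List (String × List (String × List Int))) :=
  ([("a", [("x", [1, 2])]), ("b", [])], [("a", [("x", [3, 4])])])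

def Spec_append_top_dictionaries (dict1 : List (String × List (String × List Int))) (dict2 : List (String × List (String × List Int))) (out : List (String × List (String × List Int))) : Prop := out = append_top_dictionaries_alt dict1 dict2
instance (dict1 : List (String × List (String × List Int))) (dict2 : List (String × List (String × List Int))) (out : List (String × List (String × List Int))) : Decidable (Spec_append_top_dictionaries dict1 dict2 out) := by unfold Spec_append_top_dictionaries; infer_instance

-- ===== CLAIM (what is proved, stated in full; the proofs are below) =====
def Claim_equal_append_top_dictionaries : Prop := ∀ (dict1 : List (String × List (String × List Int))) (dict2 : List (String × List (String × List Int))), Dom_append_top_dictionaries dict1 dict2 → Pre_append_top_dictionaries dict1 dict2 → Spec_append_top_dictionaries dict1 dict2 (append_top_dictionaries dict1 dict2)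

-- ===== LEMMAS AND PROOFS =====

-- the inner dict built for one key of dict1, as a named function (definitionally A's inner loop)
def pvRowD (d2 : List (String × List (String × List Int))) (key : String)
    (sub : List (String × List Int)) : PySem.Dict String (List Int) :=
  let sub1 : PySem.Dict String (List Int) := PySem.Dict.mk sub
  sub1.keys.foldl (fun inr skey =>
    let l1 := sub1.getD skey []
    let l2 := (PySem.Dict.mk ((PySem.Dict.mk d2).getD key [])).getD skey []
    let lst := (PySem.List.pyRange 0 (l1.length : Int) 1).foldl
      (fun acc i => acc ++ [PySem.List.pyGetD l1 i 0 + PySem.List.pyGetD l2 i 0]) []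
    inr.insert skey lst) PySem.Dict.empty

-- A's append loop over range(len(l1)) equals B's comprehension over the same range
lemma pvL1 (l1 l2 : List Int) :
    (PySem.List.pyRange 0 (l1.length : Int) 1).foldl
      (fun acc i => acc ++ [PySem.List.pyGetD l1 i 0 + PySem.List.pyGetD l2 i 0]) []
    = pvAddLists l1 l2 := by
  rw [PySem.List.foldl_append_singleton_eq_map, List.nil_append, pvAddLists]

-- A's inner loop produces exactly B's inner comprehension (as an items list)
lemma pvRow_items (d2 : List (String × List (String × List Int))) (key : String)
    (sub : List (String × List Int))
    (hnd : (sub.map Prod.fst).Nodup) :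
    (pvRowD d2 key sub).items
    = sub.map (fun q =>
        (q.1, pvAddLists q.2 ((PySem.Dict.mk ((PySem.Dict.mk d2).getD key [])).getD q.1 []))) := by
  have hA : pvRowD d2 key sub
      = List.foldl (fun (d : PySem.Dict String (List Int)) a =>
          d.insert a
            ((PySem.List.pyRange 0 ((((PySem.Dict.mk sub).getD a []) : List Int).length : Int) 1).foldl
              (fun acc i => acc ++ [PySem.List.pyGetD ((PySem.Dict.mk sub).getD a []) i 0
                + PySem.List.pyGetD ((PySem.Dict.mk ((PySem.Dict.mk d2).getD key [])).getD a []) i 0]) []))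
          PySem.Dict.empty (sub.map Prod.fst) := rfl
  rw [hA, PySem.Dict.items_foldl_insert_fresh (sub.map Prod.fst) (fun a => a) _ _
    (fun a _ => PySem.Dict.contains_empty a) (by simpa using hnd)]
  rw [show (PySem.Dict.empty : PySem.Dict String (List Int)).items = [] from rfl, List.nil_append,
    List.map_map]
  apply List.map_congr_left
  intro q hq
  have hget : (PySem.Dict.mk sub).getD q.1 [] = q.2 :=
    PySem.Dict.getD_of_mem_items _ (by exact hq) (by simpa using hnd) _
  simp only [Function.comp_apply, hget]
  rw [pvL1]

-- ===== VERDICT (by name: the statement is the Claim_ definition above) =====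
theorem append_top_dictionaries_spec : Claim_equal_append_top_dictionaries := by
  intro d1 d2 _ hpre
  obtain ⟨hnd, hall⟩ := hpre
  unfold Spec_append_top_dictionaries append_top_dictionaries append_top_dictionaries_alt
  by_cases hne : d1 = []
  · subst hne; simp
  · have hk : ¬ ((PySem.Dict.mk d1).keys.length = 0) := by
      simpa [PySem.Dict.keys, List.length_eq_zero_iff] using hne
    have hE : ¬ (d1.isEmpty) := by simpa [List.isEmpty_iff] using hne
    simp only [hk, hE, if_false, Bool.false_eq_true]
    have hA : (PySem.Dict.mk d1).keys.foldl (fun res key =>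
        let sub1 : PySem.Dict String (List Int) := PySem.Dict.mk ((PySem.Dict.mk d1).getD key [])
        let inner : PySem.Dict String (List Int) :=
          sub1.keys.foldl (fun inr skey =>
            let l1 := sub1.getD skey []
            let l2 := (PySem.Dict.mk ((PySem.Dict.mk d2).getD key [])).getD skey []
            let lst := (PySem.List.pyRange 0 (l1.length : Int) 1).foldl
              (fun acc i => acc ++ [PySem.List.pyGetD l1 i 0 + PySem.List.pyGetD l2 i 0]) []
            inr.insert skey lst) PySem.Dict.empty
        res.insert key inner) PySem.Dict.empty
      = List.foldl (fun (d : PySem.Dict String (PySem.Dict String (List Int))) a =>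
          d.insert a (pvRowD d2 a ((PySem.Dict.mk d1).getD a []))) PySem.Dict.empty
          (d1.map Prod.fst) := rfl
    rw [hA, PySem.Dict.items_foldl_insert_fresh (d1.map Prod.fst) (fun a => a) _ _
      (fun a _ => PySem.Dict.contains_empty a) (by simpa using hnd)]
    rw [show (PySem.Dict.empty : PySem.Dict String (PySem.Dict String (List Int))).items = [] from rfl,
      List.nil_append, List.map_map, List.map_map]
    apply List.map_congr_left
    intro p hp
    have hget : (PySem.Dict.mk d1).getD p.1 [] = p.2 :=
      PySem.Dict.getD_of_mem_items _ (by exact hp) (by simpa using hnd) _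
    simp only [Function.comp_apply, hget]
    rw [pvRow_items d2 p.1 p.2 (hall p hp).1]
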